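-- pv_equiv track=rewrite | github.com/SUwonglab/arcsv | arcsv/sv_inference.py | duplicated_blocks
-- ===== SOURCE A (Python) =====
-- from collections import Counter
-- from math import log, floor
--
-- def duplicated_blocks(paths):
--     which_dup = set()
--     for path in paths:
--         odd_blocks = [path[j] for j in range(1, len(path), 2)]
--         even_blocks = [path[j] for j in range(0, len(path), 2)]
--         c_odd = Counter(odd_blocks)
--         c_even = Counter(even_blocks)
--         for c in c_odd, c_even:
--             for it in c.items():
--                 if it[1] > 1:
--                     block_id = floor(it[0] / 2)
--                     which_dup.add(block_id)
--     return which_dup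
-- ===== SOURCE B (Python) =====
-- def duplicated_blocks(paths):
--     which_dup = set()
--     for path in paths:
--         for seq in (path[1::2], path[0::2]):
--             pending = list(seq)
--             seen = []
--             while pending:
--                 x = pending.pop(0)
--                 if x not in seen and x in pending:
--                     which_dup.add(x // 2)
--                 seen.append(x)
--     return which_dup
-- ===== Notes on version B (the rewrite author's own statement) =====
-- stated objective: alternative
-- what changed: Replaces the two per-path Counter constructions and the items() count>1 scan with a single left-to-right scan of each parity slice that records floor(x/2) at the first occurrence of a value that occurs again later (seen-prefix / pending-rest test), so no counting structure is built.
import Mathlib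
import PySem

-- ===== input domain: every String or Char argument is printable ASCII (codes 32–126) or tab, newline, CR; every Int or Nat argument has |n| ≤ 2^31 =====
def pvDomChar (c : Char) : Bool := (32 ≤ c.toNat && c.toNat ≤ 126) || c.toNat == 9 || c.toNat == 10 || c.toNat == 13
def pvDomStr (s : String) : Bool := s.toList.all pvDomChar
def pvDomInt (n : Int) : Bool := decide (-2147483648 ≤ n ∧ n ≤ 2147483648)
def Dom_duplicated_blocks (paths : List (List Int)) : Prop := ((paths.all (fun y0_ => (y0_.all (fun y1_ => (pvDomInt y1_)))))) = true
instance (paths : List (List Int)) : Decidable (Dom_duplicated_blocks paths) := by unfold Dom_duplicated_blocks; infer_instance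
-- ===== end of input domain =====

-- B replaces the per-path Counter builds and the items() count>1 scan by one left-to-right
-- seen/pending scan per parity sequence (alternative decomposition, no speed claim).
-- The returned Python set is modelled as its insertion-order distinct-element list (PySem.Set).

-- ===== PORT A =====
-- floor(it[0]/2) is ported as PySem.Int.floordiv it.1 2: for |x| ≤ 2^31, x/2 is an exact
-- binary float, so Python's floor(x / 2) equals x // 2.  path[j] for j drawn from
-- range(start, len(path), 2) is always in range, so pyGetD with (unreachable) default 0 is exact.
def duplicated_blocks (paths : List (List Int)) : List Int :=
  paths.foldl (fun which_dup path =>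
    let odd_blocks := (PySem.List.pyRange 1 (path.length : Int) 2).map (fun j => PySem.List.pyGetD path j 0)
    let even_blocks := (PySem.List.pyRange 0 (path.length : Int) 2).map (fun j => PySem.List.pyGetD path j 0)
    let c_odd := PySem.Dict.counter odd_blocks
    let c_even := PySem.Dict.counter even_blocks
    [c_odd, c_even].foldl (fun wd c =>
      c.items.foldl (fun wd it =>
        if 1 < it.2 then PySem.Set.add wd (PySem.Int.floordiv it.1 2) else wd) wd) which_dup)
    PySem.Set.empty

-- ===== PORT B =====
-- the 'while pending: x = pending.pop(0) …' loop of Source B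
def pvScan (seen : List Int) (pending : List Int) (acc : PySem.Set Int) : PySem.Set Int :=
  match pending with
  | [] => acc
  | x :: rest =>
    let acc' := if !(seen.contains x) && rest.contains x
                then PySem.Set.add acc (PySem.Int.floordiv x 2) else acc
    pvScan (seen ++ [x]) rest acc'

def duplicated_blocks_alt (paths : List (List Int)) : List Int :=
  paths.foldl (fun which_dup path =>
    let st := path.foldl (fun (st : List Int × List Int × Bool) x =>
      if st.2.2 then (st.1 ++ [x], st.2.1, !st.2.2) else (st.1, st.2.1 ++ [x], !st.2.2))
      ([], [], true)
    [st.2.1, st.1].foldl (fun wd seq => pvScan [] seq wd) which_dup)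
    PySem.Set.empty

-- ===== PRECONDITION & SPEC =====
def Spec_duplicated_blocks (paths : List (List Int)) (out : List Int) : Prop := out = duplicated_blocks_alt paths
instance (paths : List (List Int)) (out : List Int) : Decidable (Spec_duplicated_blocks paths out) := by unfold Spec_duplicated_blocks; infer_instance

-- ===== CLAIM (what is proved, stated in full; the proofs are below) =====
def Claim_equal_duplicated_blocks : Prop := ∀ (paths : List (List Int)), Dom_duplicated_blocks paths → Spec_duplicated_blocks paths (duplicated_blocks paths)

-- ===== LEMMAS AND PROOFS =====

-- the even- and odd-position sublists, written exactly as A's comprehensions compute them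
def pvE (l : List Int) : List Int :=
  (PySem.List.pyRange 0 (l.length : Int) 2).map (fun j => PySem.List.pyGetD l j 0)
def pvO (l : List Int) : List Int :=
  (PySem.List.pyRange 1 (l.length : Int) 2).map (fun j => PySem.List.pyGetD l j 0)

-- the conditional fold over the distinct elements both ports reduce to
def pvF (s seen : List Int) : PySem.Set Int → Int → PySem.Set Int :=
  fun a k => if !(seen.contains k) && decide (1 < List.count k s)
             then PySem.Set.add a (PySem.Int.floordiv k 2) else a

theorem pv_E_nil : pvE [] = [] := rfl
theorem pv_O_nil : pvO [] = [] := rfl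

theorem pv_shift (x : Int) (t : List Int) (a b : Int) (ha : 1 ≤ a) :
    (PySem.List.pyRange a b 2).map (fun j => PySem.List.pyGetD (x :: t) j 0)
      = (PySem.List.pyRange (a-1) (b-1) 2).map (fun j => PySem.List.pyGetD t j 0) := by
  rw [PySem.List.pyRange_of_pos a b (by norm_num), PySem.List.pyRange_of_pos (a-1) (b-1) (by norm_num)]
  rw [List.map_map, List.map_map]
  have hn : (if a < b then ((b - a + 2 - 1) / 2).toNat else 0)
      = (if a - 1 < b - 1 then ((b - 1 - (a - 1) + 2 - 1) / 2).toNat else 0) := by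
    split_ifs <;> omega
  rw [hn]
  apply List.map_congr_left
  intro k _
  simp only [Function.comp_apply]
  rw [PySem.List.pyGetD_of_nonneg (x :: t) 0 (by omega), PySem.List.pyGetD_of_nonneg t 0 (by omega)]
  have h1 : (a + 2 * (k : Int)).toNat = (a - 1 + 2 * (k : Int)).toNat + 1 := by omega
  rw [h1, List.getD_cons_succ]

theorem pv_two_cons0 (b : Int) (h : 0 < b) :
    PySem.List.pyRange 0 b 2 = 0 :: PySem.List.pyRange 2 b 2 := by
  rw [PySem.List.pyRange_of_pos 0 b (by norm_num), PySem.List.pyRange_of_pos 2 b (by norm_num)]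
  have hn : (if (0:Int) < b then ((b - 0 + 2 - 1) / 2).toNat else 0)
      = ((if (2:Int) < b then ((b - 2 + 2 - 1) / 2).toNat else 0)) + 1 := by
    split_ifs <;> omega
  rw [hn, List.range_succ_eq_map, List.map_cons, List.map_map]
  congr 1
  apply List.map_congr_left
  intro a _
  simp only [Function.comp_apply]
  push_cast
  ring

theorem pv_O_cons (x : Int) (t : List Int) : pvO (x :: t) = pvE t := by
  have h := pv_shift x t 1 ((t.length : Int) + 1) le_rfl
  have e1 : (1:Int) - 1 = 0 := by norm_num
  have e2 : ((t.length : Int) + 1) - 1 = (t.length : Int) := by ring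
  rw [e1, e2] at h
  simp only [pvO, pvE, List.length_cons]
  push_cast
  exact h

theorem pv_E_cons (x : Int) (t : List Int) : pvE (x :: t) = x :: pvO t := by
  have hsh := pv_shift x t 2 ((t.length : Int) + 1) (by norm_num)
  have e2 : ((t.length : Int) + 1) - 1 = (t.length : Int) := by ring
  have e3 : (2:Int) - 1 = 1 := by norm_num
  rw [e3, e2] at hsh
  simp only [pvE, pvO, List.length_cons]
  push_cast
  rw [pv_two_cons0 _ (by positivity), List.map_cons, hsh]
  congr 1
  rw [PySem.List.pyGetD_of_nonneg (x :: t) 0 le_rfl]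
  rfl

-- the toggle loop of B splits a path into (pvE, pvO)
theorem pv_toggle (l : List Int) : ∀ (e o : List Int) (b : Bool),
    l.foldl (fun (st : List Int × List Int × Bool) x =>
        if st.2.2 then (st.1 ++ [x], st.2.1, !st.2.2) else (st.1, st.2.1 ++ [x], !st.2.2))
      (e, o, b)
    = (e ++ (if b then pvE l else pvO l), o ++ (if b then pvO l else pvE l),
       if l.length % 2 = 0 then b else !b) := by
  induction l with
  | nil => intro e o b; simp [pv_E_nil, pv_O_nil]
  | cons x t ih =>
    intro e o b
    rw [List.foldl_cons]
    cases b with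
    | true =>
      show List.foldl _ (e ++ [x], o, false) t = _
      rw [ih (e ++ [x]) o false]
      rcases Nat.mod_two_eq_zero_or_one t.length with h | h <;>
        · simp [h, pv_E_cons, pv_O_cons, List.append_assoc]; omega
    | false =>
      show List.foldl _ (e, o ++ [x], true) t = _
      rw [ih e (o ++ [x]) true]
      rcases Nat.mod_two_eq_zero_or_one t.length with h | h <;>
        · simp [h, pv_E_cons, pv_O_cons, List.append_assoc]; omega

-- a fold step that fixes x can ignore the removal of x from the list
theorem pv_foldl_discard (f : PySem.Set Int → Int → PySem.Set Int) (x : Int)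
    (hx : ∀ a, f a x = a) : ∀ (l : List Int) (acc : PySem.Set Int),
    (l.filter (fun y => !(y == x))).foldl f acc = l.foldl f acc := by
  intro l
  induction l with
  | nil => intro acc; rfl
  | cons y t ih =>
    intro acc
    by_cases h : y = x
    · subst h
      simp [List.foldl_cons, hx, ih]
    · have hb : (y == x) = false := by simp [h]
      simp [hb, List.foldl_cons, ih]

-- B's scan equals a conditional fold over the distinct elements (A's Counter key order)
theorem pv_scan_eq (s : List Int) : ∀ (seen : List Int) (acc : PySem.Set Int),
    pvScan seen s acc = (PySem.Set.ofList s).foldl (pvF s seen) acc := by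
  induction s with
  | nil => intro seen acc; rfl
  | cons x rest ih =>
    intro seen acc
    have hcnt : decide (1 < List.count x (x :: rest)) = rest.contains x := by
      by_cases hmem : x ∈ rest
      · have h1 : rest.contains x = true := by simp [hmem]
        have h2 : 0 < List.count x rest := List.count_pos_iff.mpr hmem
        simp only [List.count_cons_self, h1, decide_eq_true_eq]
        omega
      · have h2 : List.count x rest = 0 := List.count_eq_zero.mpr hmem
        simp [List.count_cons_self, h2, hmem]
    have hxskip : ∀ a, pvF rest (seen ++ [x]) a x = a := by
      intro a; simp [pvF]
    have hagree : ∀ (a : PySem.Set Int), ∀ y ∈ List.filter (fun y => !(y == x)) (PySem.Set.ofList rest),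
        pvF rest (seen ++ [x]) a y = pvF (x :: rest) seen a y := by
      intro a y hy
      have hyx : y ≠ x := by
        have h2 := List.of_mem_filter hy
        simpa using h2
      have hc : List.count y (x :: rest) = List.count y rest := List.count_cons_of_ne hyx.symm
      simp [pvF, hc, hyx]
    rw [show pvScan seen (x :: rest) acc
        = pvScan (seen ++ [x]) rest (if !(seen.contains x) && rest.contains x
            then PySem.Set.add acc (PySem.Int.floordiv x 2) else acc) from rfl]
    rw [ih (seen ++ [x])]
    rw [PySem.Set.ofList_cons, List.foldl_cons]
    have hinit : pvF (x :: rest) seen acc x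
        = (if !(seen.contains x) && rest.contains x
           then PySem.Set.add acc (PySem.Int.floordiv x 2) else acc) := by
      simp only [pvF, hcnt]
    rw [hinit]
    rw [show (PySem.Set.ofList rest).discard x
        = List.filter (fun y => !(y == x)) (PySem.Set.ofList rest) from rfl]
    rw [← pv_foldl_discard (pvF rest (seen ++ [x])) x hxskip (PySem.Set.ofList rest)]
    exact PySem.List.foldl_congr_mem _ _ _ _ hagree

-- A's items loop equals B's scan with empty 'seen'
theorem pv_items_eq (s : List Int) (acc : PySem.Set Int) :
    (PySem.Dict.counter s).items.foldl (fun wd it =>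
        if 1 < it.2 then PySem.Set.add wd (PySem.Int.floordiv it.1 2) else wd) acc
      = pvScan [] s acc := by
  rw [pv_scan_eq s [] acc, PySem.Dict.items_counter, List.foldl_map]
  apply PySem.List.foldl_congr_mem
  intro a k _
  show (if (1:Int) < ((List.count k s : Nat) : Int)
        then PySem.Set.add a (PySem.Int.floordiv k 2) else a) = pvF s [] a k
  have hcast : ((1:Int) < ((List.count k s : Nat) : Int)) ↔ 1 < List.count k s := Nat.one_lt_cast
  by_cases h : 1 < List.count k s
  · simp [pvF, h, Nat.one_lt_cast]
  · simp [pvF, h, Nat.one_lt_cast]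

theorem pv_fold_eq : ∀ (paths : List (List Int)) (acc : PySem.Set Int),
    paths.foldl (fun which_dup path =>
      let odd_blocks := (PySem.List.pyRange 1 (path.length : Int) 2).map (fun j => PySem.List.pyGetD path j 0)
      let even_blocks := (PySem.List.pyRange 0 (path.length : Int) 2).map (fun j => PySem.List.pyGetD path j 0)
      let c_odd := PySem.Dict.counter odd_blocks
      let c_even := PySem.Dict.counter even_blocks
      [c_odd, c_even].foldl (fun wd c =>
        c.items.foldl (fun wd it =>
          if 1 < it.2 then PySem.Set.add wd (PySem.Int.floordiv it.1 2) else wd) wd) which_dup) acc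
    = paths.foldl (fun which_dup path =>
      let st := path.foldl (fun (st : List Int × List Int × Bool) x =>
        if st.2.2 then (st.1 ++ [x], st.2.1, !st.2.2) else (st.1, st.2.1 ++ [x], !st.2.2))
        ([], [], true)
      [st.2.1, st.1].foldl (fun wd seq => pvScan [] seq wd) which_dup) acc := by
  intro paths
  induction paths with
  | nil => intro acc; rfl
  | cons p t ih =>
    intro acc
    conv_lhs => rw [List.foldl_cons]
    conv_rhs => rw [List.foldl_cons]
    rw [ih]
    congr 1
    simp only [List.foldl_cons, List.foldl_nil, pv_items_eq, pv_toggle, List.nil_append, pvE, pvO,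
      if_true, ite_true]

theorem duplicated_blocks_spec : Claim_equal_duplicated_blocks := by
  intro paths _
  unfold Spec_duplicated_blocks duplicated_blocks duplicated_blocks_alt
  exact pv_fold_eq paths PySem.Set.empty
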